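-- pv_equiv track=rewrite | github.com/FarishaHabibi/Lab-report-1 | SD23020_Lab1.py | dfs
-- ===== SOURCE A (Python) =====
-- from typing import Dict, List, Set
--
-- def dfs(graph: Dict[str, List[str]], start: str, visited: Set[str] = None) -> List[str]:
--     if visited is None:
--         visited = set()
--     visited.add(start)
--     order = [start]
--     for n in sorted(graph.get(start, [])):
--         if n not in visited:
--             order.extend(dfs(graph, n, visited))
--     return order
-- ===== SOURCE B (Python) =====
-- def dfs(graph, start, visited=None):
--     if visited is None:
--         visited = set()
--     visited.add(start)
--     order = [start]
--     stack = sorted(graph.get(start, []))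
--     while stack:
--         node = stack.pop(0)
--         if node in visited:
--             continue
--         visited.add(node)
--         order.append(node)
--         stack = sorted(graph.get(node, [])) + stack
--     return order
-- ===== Notes on version B (the rewrite author's own statement) =====
-- stated objective: alternative
-- what changed: Replaces A's recursive DFS (one Python call per visited node, recursion on each unvisited sorted neighbor) with a single iterative loop over an explicit worklist stack: pop the front, skip if visited, otherwise mark, emit, and prepend the node's sorted neighbors; equivalence is about the return value, and B also mutates a passed-in visited set identically to A.
import Mathlib
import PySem

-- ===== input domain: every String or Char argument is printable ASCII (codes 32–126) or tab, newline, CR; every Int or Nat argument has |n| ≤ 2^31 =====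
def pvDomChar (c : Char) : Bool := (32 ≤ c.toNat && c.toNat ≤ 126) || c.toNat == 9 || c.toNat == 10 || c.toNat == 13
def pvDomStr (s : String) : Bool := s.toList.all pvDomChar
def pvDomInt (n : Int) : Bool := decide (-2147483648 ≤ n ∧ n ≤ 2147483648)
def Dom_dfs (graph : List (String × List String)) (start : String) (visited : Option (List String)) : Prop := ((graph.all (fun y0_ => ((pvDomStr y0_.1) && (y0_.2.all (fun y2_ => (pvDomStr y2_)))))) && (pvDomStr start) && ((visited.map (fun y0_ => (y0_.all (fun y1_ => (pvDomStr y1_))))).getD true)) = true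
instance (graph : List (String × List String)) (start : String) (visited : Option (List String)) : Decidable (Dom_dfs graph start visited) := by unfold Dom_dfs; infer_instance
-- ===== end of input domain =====

-- B replaces A's recursive DFS with one iterative worklist loop (pop front, skip visited, prepend sorted
-- neighbors); same return value everywhere, and both mutate a caller-supplied visited set identically,
-- so only the return value is at issue here.

-- ===== PORT A =====
-- graph.get(k, []) on the association list (first match, Python dict keys are unique)
def pvGet (g : List (String × List String)) (k : String) : List String :=
  match g with
  | [] => []
  | p :: t => if p.1 = k then p.2 else pvGet t k

def pvUniv (g : List (String × List String)) : List String := g.flatMap (fun p => p.2)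

-- A is recursive on a visited set that only grows; the Nat fuel below is only a totality guard:
-- the exposed `dfs` supplies fuel (total number of neighbor occurrences + 1), which always suffices,
-- so the fueled functions compute exactly what the Python recursion computes.
mutual
def dfsAuxA : Nat → List (String × List String) → String → List String → List String × List String
  | 0, _, _, v => ([], v)
  | f+1, g, s, v =>
    let v1 := PySem.Set.add v s
    let r := dfsLoopA f g (PySem.List.sorted (pvGet g s) (fun x => x) false) v1
    (s :: r.1, r.2)
  termination_by f _ _ _ => (f, 0)
def dfsLoopA : Nat → List (String × List String) → List String → List String → List String × List String
  | _, _, [], v => ([], v)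
  | f, g, n :: rest, v =>
    if n ∈ v then dfsLoopA f g rest v
    else
      let r1 := dfsAuxA f g n v
      let r2 := dfsLoopA f g rest r1.2
      (r1.1 ++ r2.1, r2.2)
  termination_by f _ ns _ => (f, ns.length + 1)
end

def dfs (graph : List (String × List String)) (start : String) (visited : Option (List String)) : List String :=
  (dfsAuxA ((pvUniv graph).length + 1) graph start (visited.getD [])).1

-- ===== PORT B =====
-- termination helpers for the worklist loop (cited by name in decreasing_by)
theorem pv_mem_getD_univ (g : List (String × List String)) (k : String) (x : String)
    (h : x ∈ pvGet g k) : x ∈ pvUniv g := by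
  induction g with
  | nil => simp [pvGet] at h
  | cons p t ih =>
    rw [pvGet] at h
    by_cases hk : p.1 = k
    · rw [if_pos hk] at h
      exact List.mem_flatMap.mpr ⟨p, List.mem_cons_self .., h⟩
    · rw [if_neg hk] at h
      have := ih h
      simp [pvUniv, List.mem_flatMap] at this ⊢
      rcases this with ⟨a, b, hab, hx⟩
      exact Or.inr ⟨a, b, hab, hx⟩

theorem pv_len_getD_univ (g : List (String × List String)) (k : String) :
    (pvGet g k).length ≤ (pvUniv g).length := by
  induction g with
  | nil => simp [pvGet]
  | cons p t ih =>
    rw [pvGet]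
    by_cases hk : p.1 = k
    · rw [if_pos hk]; simp [pvUniv]
    · rw [if_neg hk]; simp [pvUniv] at ih ⊢; omega

theorem pv_measure_skip (W c c' r : Nat) (h : c' ≤ c) :
    (W + 2) * c' + r < (W + 2) * c + (r + 1) := by
  have := Nat.mul_le_mul_left (W + 2) h; omega

theorem pv_measure_visit (W c c' a r : Nat) (ha : a ≤ W) (h : c' + 1 ≤ c) :
    (W + 2) * c' + (a + r) < (W + 2) * c + (r + 1) := by
  have h1 : (W + 2) * (c' + 1) ≤ (W + 2) * c := Nat.mul_le_mul_left _ h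
  have h2 : (W + 2) * (c' + 1) = (W + 2) * c' + (W + 2) := by ring
  omega

def dfsLoopB (g : List (String × List String)) (stack vis ord : List String) : List String :=
  match stack with
  | [] => ord
  | n :: rest =>
    if n ∈ vis then dfsLoopB g rest vis ord
    else dfsLoopB g (PySem.List.sorted (pvGet g n) (fun x => x) false ++ rest)
           (PySem.Set.add vis n) (ord ++ [n])
termination_by ((pvUniv g).length + 2) * (((pvUniv g).toFinset ∪ stack.toFinset) \ vis.toFinset).card + stack.length
decreasing_by
  · -- visited node popped: worklist shrinks, the card does not grow
    apply pv_measure_skip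
    apply Finset.card_le_card
    apply Finset.sdiff_subset_sdiff _ (Finset.Subset.refl _)
    intro x hx
    simp at hx ⊢
    tauto
  · -- new node n: it leaves the unvisited set, which strictly shrinks
    rename_i hn
    have hadd : (PySem.Set.add vis n).toFinset = insert n vis.toFinset := by
      simp [PySem.Set.add, PySem.Set.contains, hn]
    rw [List.length_append, hadd, PySem.List.length_sorted]
    apply pv_measure_visit _ _ _ _ _ (pv_len_getD_univ g n)
    have hnS : n ∈ ((pvUniv g).toFinset ∪ (n :: rest).toFinset) \ vis.toFinset := by
      simp [hn]
    calc (((pvUniv g).toFinset ∪ (PySem.List.sorted (pvGet g n) (fun x => x) false ++ rest).toFinset) \ insert n vis.toFinset).card + 1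
        ≤ ((((pvUniv g).toFinset ∪ (n :: rest).toFinset) \ vis.toFinset).erase n).card + 1 := by
          apply Nat.add_le_add_right
          apply Finset.card_le_card
          intro x hx
          have hu := pv_mem_getD_univ g n x
          simp [PySem.List.mem_sorted] at hx ⊢
          tauto
      _ = (((pvUniv g).toFinset ∪ (n :: rest).toFinset) \ vis.toFinset).card := by
          rw [Finset.card_erase_of_mem hnS]
          have : 0 < (((pvUniv g).toFinset ∪ (n :: rest).toFinset) \ vis.toFinset).card :=
            Finset.card_pos.mpr ⟨n, hnS⟩
          omega

def dfs_alt (graph : List (String × List String)) (start : String) (visited : Option (List String)) : List String :=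
  let vis := PySem.Set.add (visited.getD []) start
  dfsLoopB graph (PySem.List.sorted (pvGet graph start) (fun x => x) false) vis [start]

-- ===== PRECONDITION & SPEC =====
def Spec_dfs (graph : List (String × List String)) (start : String) (visited : Option (List String)) (out : List String) : Prop := out = dfs_alt graph start visited
instance (graph : List (String × List String)) (start : String) (visited : Option (List String)) (out : List String) : Decidable (Spec_dfs graph start visited out) := by unfold Spec_dfs; infer_instance

-- ===== CLAIM (what is proved, stated in full; the proofs are below) =====
def Claim_equal_dfs : Prop := ∀ (graph : List (String × List String)) (start : String) (visited : Option (List String)), Dom_dfs graph start visited → Spec_dfs graph start visited (dfs graph start visited)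

-- ===== LEMMAS AND PROOFS =====

-- the recursion's visited set only grows
theorem pv_visited_mono (f : Nat) (g : List (String × List String)) :
    (∀ s v x, x ∈ v → x ∈ (dfsAuxA f g s v).2) ∧
    (∀ ns v x, x ∈ v → x ∈ (dfsLoopA f g ns v).2) := by
  induction f with
  | zero =>
    have haux : ∀ s v x, x ∈ v → x ∈ (dfsAuxA 0 g s v).2 := by
      intro s v x hx; simp [dfsAuxA]; exact hx
    refine ⟨haux, ?_⟩
    intro ns
    induction ns with
    | nil => intro v x hx; simpa [dfsLoopA] using hx
    | cons n rest ih =>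
      intro v x hx
      by_cases hn : n ∈ v
      · simpa [dfsLoopA, hn] using ih v x hx
      · simp only [dfsLoopA, if_neg hn]
        exact ih _ x (haux n v x hx)
  | succ f ihf =>
    have haux : ∀ s v x, x ∈ v → x ∈ (dfsAuxA (f+1) g s v).2 := by
      intro s v x hx
      simp only [dfsAuxA]
      exact ihf.2 _ _ x ((PySem.Set.mem_add _ _ _).mpr (Or.inl hx))
    refine ⟨haux, ?_⟩
    intro ns
    induction ns with
    | nil => intro v x hx; simpa [dfsLoopA] using hx
    | cons n rest ih =>
      intro v x hx
      by_cases hn : n ∈ v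
      · simpa [dfsLoopA, hn] using ih v x hx
      · simp only [dfsLoopA, if_neg hn]
        exact ih _ x (haux n v x hx)

-- main simulation: running the worklist loop on ns ++ stack first consumes ns exactly the
-- way A's recursion over ns does
theorem pv_sim (f : Nat) (g : List (String × List String)) :
    ∀ (ns v stack ord : List String),
    (∀ n ∈ ns, n ∈ pvUniv g) →
    ((pvUniv g).toFinset \ v.toFinset).card ≤ f →
    dfsLoopB g (ns ++ stack) v ord =
      dfsLoopB g stack (dfsLoopA f g ns v).2 (ord ++ (dfsLoopA f g ns v).1) := by
  induction f with
  | zero =>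
    intro ns
    induction ns with
    | nil => intro v stack ord _ _; simp [dfsLoopA]
    | cons n rest ih =>
      intro v stack ord hmem hcard
      by_cases hn : n ∈ v
      · rw [List.cons_append, dfsLoopB]
        simp only [if_pos hn]
        rw [dfsLoopA, if_pos hn]
        exact ih v stack ord (fun m hm => hmem m (List.mem_cons_of_mem _ hm)) hcard
      · exfalso
        have hnin : n ∈ (pvUniv g).toFinset \ v.toFinset := by
          simp [hmem n (List.mem_cons_self ..), hn]
        have := Finset.card_pos.mpr ⟨n, hnin⟩
        omega
  | succ f ihf =>
    intro ns
    induction ns with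
    | nil => intro v stack ord _ _; simp [dfsLoopA]
    | cons n rest ih =>
      intro v stack ord hmem hcard
      by_cases hn : n ∈ v
      · rw [List.cons_append, dfsLoopB]
        simp only [if_pos hn]
        rw [dfsLoopA, if_pos hn]
        exact ih v stack ord (fun m hm => hmem m (List.mem_cons_of_mem _ hm)) hcard
      · have hnU : n ∈ pvUniv g := hmem n (List.mem_cons_self ..)
        have hadd : (PySem.Set.add v n).toFinset = insert n v.toFinset := by
          simp [PySem.Set.add, PySem.Set.contains, hn]
        have hcard' : ((pvUniv g).toFinset \ (PySem.Set.add v n).toFinset).card ≤ f := by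
          rw [hadd]
          have hnin : n ∈ (pvUniv g).toFinset \ v.toFinset := by simp [hnU, hn]
          have hsub : (pvUniv g).toFinset \ insert n v.toFinset ⊆
              ((pvUniv g).toFinset \ v.toFinset).erase n := by
            intro x hx; simp at hx ⊢; tauto
          have h1 := Finset.card_le_card hsub
          rw [Finset.card_erase_of_mem hnin] at h1
          have h2 := Finset.card_pos.mpr ⟨n, hnin⟩
          omega
        -- B side: pop n, mark it, prepend its sorted neighbours
        rw [List.cons_append, dfsLoopB]
        simp only [if_neg hn]
        set Sn := PySem.List.sorted (pvGet g n) (fun x => x) false with hSn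
        have hmemSn : ∀ m ∈ Sn, m ∈ pvUniv g := by
          intro m hm
          rw [hSn, PySem.List.mem_sorted] at hm
          exact pv_mem_getD_univ g n m hm
        rw [ihf Sn (PySem.Set.add v n) (rest ++ stack) (ord ++ [n]) hmemSn hcard']
        set r1 := dfsLoopA f g Sn (PySem.Set.add v n) with hr1
        have hcard'' : ((pvUniv g).toFinset \ r1.2.toFinset).card ≤ f + 1 := by
          have hsub : (pvUniv g).toFinset \ r1.2.toFinset ⊆ (pvUniv g).toFinset \ v.toFinset := by
            intro x hx
            simp at hx ⊢
            refine ⟨hx.1, fun hxv => hx.2 ?_⟩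
            exact (pv_visited_mono f g).2 Sn _ x ((PySem.Set.mem_add _ _ _).mpr (Or.inl hxv))
          exact le_trans (Finset.card_le_card hsub) hcard
        rw [ih r1.2 stack (ord ++ [n] ++ r1.1)
              (fun m hm => hmem m (List.mem_cons_of_mem _ hm)) hcard'']
        -- A side: unfold one step of the recursion
        rw [dfsLoopA, if_neg hn]
        simp only [dfsAuxA, ← hSn, ← hr1]
        simp [List.append_assoc]

-- ===== VERDICT (by name: the statement is the Claim_ definition above) =====
theorem dfs_spec : Claim_equal_dfs := by
  intro graph start visited _
  unfold Spec_dfs dfs dfs_alt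
  set v0 := visited.getD [] with hv0
  set W := (pvUniv graph).length with hW
  have hcard : ((pvUniv graph).toFinset \ (PySem.Set.add v0 start).toFinset).card ≤ W := by
    calc ((pvUniv graph).toFinset \ (PySem.Set.add v0 start).toFinset).card
        ≤ (pvUniv graph).toFinset.card := Finset.card_le_card (Finset.sdiff_subset)
      _ ≤ (pvUniv graph).length := List.toFinset_card_le _
  have hmem : ∀ m ∈ PySem.List.sorted (pvGet graph start) (fun x => x) false,
      m ∈ pvUniv graph := by
    intro m hm
    rw [PySem.List.mem_sorted] at hm
    exact pv_mem_getD_univ graph start m hm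
  have := pv_sim W graph
      (PySem.List.sorted (pvGet graph start) (fun x => x) false)
      (PySem.Set.add v0 start) [] [start] hmem hcard
  rw [List.append_nil] at this
  rw [this]
  simp only [dfsAuxA]
  rw [dfsLoopB]
  simp
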